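-- pv_equiv track=rewrite | github.com/Raj2366/project_report_automation | app.py | parse_custom_sections
-- ===== SOURCE A (Python) =====
-- def parse_custom_sections(custom_sections_str):
--     """
--     Parse custom sections string into individual sections, handling commas within section titles.
--     Uses a simple heuristic: if a comma is followed by a space, it's a separator.
--     Otherwise, it's part of the section title.
--     """
--     sections = []
--     current_section = []
--
--     for part in custom_sections_str.split(','):
--         part = part.strip()
--         if not part:
--             continue
--
--         # If the part starts with a capital letter (after any leading spaces)
--         # and we have content in current_section, consider it a new section
--         if current_section and part and part[0].isupper():
--             sections.append(', '.join(current_section))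
--             current_section = [part]
--         else:
--             current_section.append(part)
--
--     if current_section:
--         sections.append(', '.join(current_section))
--
--     return sections
-- ===== SOURCE B (Python) =====
-- def parse_custom_sections(custom_sections_str):
--     # Segment extraction: clean the parts once, then repeatedly cut off one
--     # section = first part plus the following run of non-uppercase-starting parts.
--     parts = [p.strip() for p in custom_sections_str.split(',') if p.strip()]
--     sections = []
--     while parts:
--         run = 1
--         while run < len(parts) and not parts[run][0].isupper():
--             run += 1
--         sections.append(', '.join(parts[:run]))
--         parts = parts[run:]
--     return sections
-- ===== Notes on version B (the rewrite author's own statement) =====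
-- stated objective: alternative
-- what changed: Replaced A's single fold carrying a (sections, current_section) accumulator pair by a two-phase decomposition: clean the parts once with a comprehension, then repeatedly slice off one whole section (head part plus the following run of non-uppercase-starting parts).
import Mathlib
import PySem

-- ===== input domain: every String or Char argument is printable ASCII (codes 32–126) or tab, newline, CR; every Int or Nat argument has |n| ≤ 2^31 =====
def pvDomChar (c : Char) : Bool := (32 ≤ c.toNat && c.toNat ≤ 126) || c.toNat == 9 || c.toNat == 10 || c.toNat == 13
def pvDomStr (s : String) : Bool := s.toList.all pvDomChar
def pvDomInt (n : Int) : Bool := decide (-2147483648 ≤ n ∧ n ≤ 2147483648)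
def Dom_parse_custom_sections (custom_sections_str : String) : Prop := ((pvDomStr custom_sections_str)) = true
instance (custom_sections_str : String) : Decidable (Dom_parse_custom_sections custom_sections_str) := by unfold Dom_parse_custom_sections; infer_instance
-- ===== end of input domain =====

-- B replaces A's accumulator-pair fold by cleaning the parts once and repeatedly
-- slicing off one whole section; same cost, a different decomposition.

-- ===== PORT A =====
-- A's loop body: strip the part, skip if empty, then either close the current
-- section (capitalised start and a nonempty current_section) or extend it
def pvStepA (st : List String × List String) (part0 : String) : List String × List String :=
  let part := PySem.Str.strip part0
  if part = "" then st
  else if st.2 ≠ [] ∧ part ≠ "" ∧ (PySem.Str.pyGet? part 0).any PySem.Chars.isupper then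
    (st.1 ++ [PySem.Str.join ", " st.2], [part])
  else (st.1, st.2 ++ [part])

-- s.split(',') is PySem.Str.split? (none only for sep = "", and here sep = "," — exact)
def parse_custom_sections (custom_sections_str : String) : List String :=
  let st := ((PySem.Str.split? custom_sections_str ",").getD []).foldl pvStepA ([], [])
  if st.2 ≠ [] then st.1 ++ [PySem.Str.join ", " st.2] else st.1

-- ===== PORT B =====
-- part[0].isupper() (part nonempty at every use site)
def pvAltUpperFirst (p : String) : Bool := (PySem.Str.pyGet? p 0).any PySem.Chars.isupper

-- inner while: advance `run` over the following non-uppercase-starting parts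
def pvAltRun (parts : List String) (run : Nat) : Nat :=
  if run < parts.length ∧ pvAltUpperFirst (parts.getD run "") = false then
    pvAltRun parts (run + 1)
  else run
termination_by parts.length - run

theorem pvAltRun_ge (parts : List String) (run : Nat) : run ≤ pvAltRun parts run := by
  unfold pvAltRun
  split
  · exact le_trans (Nat.le_succ run) (pvAltRun_ge parts (run + 1))
  · exact le_refl run
termination_by parts.length - run

-- outer while: cut off parts[:run] as one section, continue on parts[run:]
-- (Python slices parts[:run]/parts[run:] with 0 ≤ run ≤ len are List.take/List.drop)
def pvAltLoop (parts : List String) : List String :=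
  if _hnil : parts = [] then [] else
    let run := pvAltRun parts 1
    PySem.Str.join ", " (parts.take run) :: pvAltLoop (parts.drop run)
termination_by parts.length
decreasing_by
  have h1 : 1 ≤ pvAltRun parts 1 := pvAltRun_ge parts 1
  have h2 : 0 < parts.length := List.length_pos_iff.mpr _hnil
  simp only [List.length_drop]; omega

def parse_custom_sections_alt (custom_sections_str : String) : List String :=
  pvAltLoop ((((PySem.Str.split? custom_sections_str ",").getD []).map PySem.Str.strip).filter
    (fun p => decide (p ≠ "")))

-- ===== PRECONDITION & SPEC =====
def Spec_parse_custom_sections (custom_sections_str : String) (out : List String) : Prop := out = parse_custom_sections_alt custom_sections_str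
instance (custom_sections_str : String) (out : List String) : Decidable (Spec_parse_custom_sections custom_sections_str out) := by unfold Spec_parse_custom_sections; infer_instance

-- ===== CLAIM (what is proved, stated in full; the proofs are below) =====
def Claim_equal_parse_custom_sections : Prop := ∀ (custom_sections_str : String), Dom_parse_custom_sections custom_sections_str → Spec_parse_custom_sections custom_sections_str (parse_custom_sections custom_sections_str)

-- ===== LEMMAS AND PROOFS =====

-- A's loop step on an already-cleaned (stripped, nonempty) part
def pvStepC (st : List String × List String) (p : String) : List String × List String :=
  if st.2 ≠ [] ∧ p ≠ "" ∧ (PySem.Str.pyGet? p 0).any PySem.Chars.isupper then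
    (st.1 ++ [PySem.Str.join ", " st.2], [p])
  else (st.1, st.2 ++ [p])

theorem pvDropLen (l : List String) :
    l.drop (l.takeWhile (fun q => !pvAltUpperFirst q)).length
      = l.dropWhile (fun q => !pvAltUpperFirst q) := by
  induction l with
  | nil => rfl
  | cons a l ih =>
    by_cases ha : (!pvAltUpperFirst a) = true
    · simp [ha, ih]
    · simp [ha]

def pvFinish (st : List String × List String) : List String :=
  if st.2 ≠ [] then st.1 ++ [PySem.Str.join ", " st.2] else st.1

-- ghost recursion describing A's fold section-by-section
def pvGhost (cur : List String) : List String → List String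
  | [] => [PySem.Str.join ", " cur]
  | p :: ps =>
      if pvAltUpperFirst p then PySem.Str.join ", " cur :: pvGhost [p] ps
      else pvGhost (cur ++ [p]) ps

theorem pvStepA_eq (st : List String × List String) (x : String) :
    pvStepA st x
      = if PySem.Str.strip x = "" then st else pvStepC st (PySem.Str.strip x) := rfl

theorem pvClean_foldl (l : List String) (init : List String × List String) :
    l.foldl pvStepA init
      = ((l.map PySem.Str.strip).filter (fun p => decide (p ≠ ""))).foldl pvStepC init := by
  induction l generalizing init with
  | nil => rfl
  | cons x xs ih =>
    simp only [List.foldl_cons, List.map_cons, List.filter_cons, pvStepA_eq]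
    by_cases hx : PySem.Str.strip x = ""
    · simp [hx, ih]
    · simp [hx, ih]

theorem pvInvariant (ps : List String) (secs cur : List String) (hcur : cur ≠ [])
    (hps : ∀ p ∈ ps, p ≠ "") :
    pvFinish (ps.foldl pvStepC (secs, cur)) = secs ++ pvGhost cur ps := by
  induction ps generalizing secs cur with
  | nil => simp [pvFinish, pvGhost, hcur]
  | cons p ps ih =>
    have hp : p ≠ "" := hps p (by simp)
    have hps' : ∀ q ∈ ps, q ≠ "" := fun q hq => hps q (by simp [hq])
    simp only [List.foldl_cons, pvStepC, pvGhost]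
    by_cases hu : pvAltUpperFirst p
    · rw [if_pos ⟨hcur, hp, by simpa [pvAltUpperFirst] using hu⟩, if_pos hu,
        ih _ [p] (by simp) hps']
      simp
    · rw [if_neg (by simp [pvAltUpperFirst] at hu; simp [hu]), if_neg hu,
        ih _ (cur ++ [p]) (by simp) hps']

theorem pvAltRun_eq (parts : List String) (run : Nat) (h : run ≤ parts.length) :
    pvAltRun parts run
      = run + ((parts.drop run).takeWhile (fun q => !pvAltUpperFirst q)).length := by
  unfold pvAltRun
  by_cases hlt : run < parts.length
  · have hget? : parts[run]? = some parts[run] := List.getElem?_eq_getElem hlt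
    have hdrop : parts.drop run = parts[run] :: parts.drop (run + 1) :=
      List.drop_eq_getElem_cons hlt
    by_cases hu : pvAltUpperFirst parts[run] = true
    · rw [if_neg (by simp [List.getD, hget?, hu]), hdrop, List.takeWhile_cons]
      simp [hu]
    · have hu' : pvAltUpperFirst parts[run] = false := by simpa using hu
      rw [if_pos ⟨hlt, by simp [List.getD, hget?, hu']⟩, pvAltRun_eq parts (run + 1) hlt, hdrop,
        List.takeWhile_cons]
      simp [hu']; omega
  · have hnil : parts.drop run = [] := List.drop_eq_nil_of_le (by omega)
    rw [if_neg (by simp [hlt]), hnil]; simp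
termination_by parts.length - run

theorem pvAltLoop_cons (p : String) (rest : List String) :
    pvAltLoop (p :: rest)
      = PySem.Str.join ", " (p :: rest.takeWhile (fun q => !pvAltUpperFirst q))
        :: pvAltLoop (rest.dropWhile (fun q => !pvAltUpperFirst q)) := by
  rw [pvAltLoop]
  have hrun : pvAltRun (p :: rest) 1
      = 1 + (rest.takeWhile (fun q => !pvAltUpperFirst q)).length := by
    rw [pvAltRun_eq (p :: rest) 1 (by simp)]; rfl
  have htw : rest.take (rest.takeWhile (fun q => !pvAltUpperFirst q)).length
      = rest.takeWhile (fun q => !pvAltUpperFirst q) :=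
    (List.prefix_iff_eq_take.mp (List.takeWhile_prefix _)).symm
  have hdw : rest.drop (rest.takeWhile (fun q => !pvAltUpperFirst q)).length
      = rest.dropWhile (fun q => !pvAltUpperFirst q) := pvDropLen rest
  simp only [reduceCtorEq, dite_false, hrun]
  rw [show (1 + (rest.takeWhile (fun q => !pvAltUpperFirst q)).length)
      = (rest.takeWhile (fun q => !pvAltUpperFirst q)).length + 1 by omega]
  simp only [List.take_succ_cons, List.drop_succ_cons, htw, hdw]

theorem pvGhost_eq (ps : List String) (cur : List String) :
    pvGhost cur ps
      = PySem.Str.join ", " (cur ++ ps.takeWhile (fun q => !pvAltUpperFirst q))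
        :: pvAltLoop (ps.dropWhile (fun q => !pvAltUpperFirst q)) := by
  induction ps generalizing cur with
  | nil => simp [pvGhost, pvAltLoop]
  | cons p ps ih =>
    simp only [pvGhost]
    by_cases hu : pvAltUpperFirst p
    · rw [if_pos hu]
      simp only [List.takeWhile_cons, List.dropWhile_cons, hu, Bool.not_true,
        Bool.false_eq_true, if_false, List.append_nil]
      rw [ih [p], pvAltLoop_cons]
      simp
    · rw [if_neg hu, ih (cur ++ [p])]
      simp [hu]

-- ===== VERDICT (by name: the statement is the Claim_ definition above) =====
theorem parse_custom_sections_spec : Claim_equal_parse_custom_sections := by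
  intro s _
  unfold Spec_parse_custom_sections
  show pvFinish (((PySem.Str.split? s ",").getD []).foldl pvStepA ([], []))
      = parse_custom_sections_alt s
  unfold parse_custom_sections_alt
  rw [pvClean_foldl]
  have hmem : ∀ p ∈ (((PySem.Str.split? s ",").getD []).map PySem.Str.strip).filter
      (fun p => decide (p ≠ "")), p ≠ "" := by
    intro p hp
    simpa using List.of_mem_filter hp
  cases hcase : (((PySem.Str.split? s ",").getD []).map PySem.Str.strip).filter
      (fun p => decide (p ≠ "")) with
  | nil => simp [pvAltLoop, pvFinish]
  | cons p rest =>
    rw [hcase] at hmem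
    have hp : p ≠ "" := hmem p (by simp)
    have hrest : ∀ q ∈ rest, q ≠ "" := fun q hq => hmem q (by simp [hq])
    simp only [List.foldl_cons, pvStepC]
    rw [if_neg (by simp)]
    simp only [List.nil_append]
    rw [pvInvariant rest [] [p] (by simp) hrest, pvGhost_eq, pvAltLoop_cons]
    simp
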